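-- pv_equiv track=rewrite | github.com/murane/PS | Python/codeforce/CF_1469A.py | ck
-- ===== SOURCE A (Python) =====
-- def ck(s):
--     cnt=0
--     lst=[]
--     ret=""
--     flg=True
--     for each in s:
--         if each=="?":
--             cnt+=1
--         elif each=="(":
--             if flg:
--                 flg=False
--                 ret=each
--             lst.append(cnt)
--             cnt=0
--         else:
--             if flg:
--                 flg=False
--                 ret=each
--             lst.append(cnt)
--             cnt=0
--     lst.append(cnt)
--     return ret,lst
-- ===== SOURCE B (Python) =====
-- def ck(s):
--     ret = next((c for c in s if c != '?'), "")
--     lst = [len(p) for p in ''.join(c if c == '?' else ' ' for c in s).split(' ')]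
--     return ret, lst
-- ===== Notes on version B (the rewrite author's own statement) =====
-- stated objective: idiomatic
-- what changed: Replaced A's hand-maintained cnt/flg state machine with a split-then-map-length decomposition: ret is the first non-'?' character (next on a generator), and lst is the lengths of the pieces obtained by mapping every non-'?' character to a single separator and splitting on it.
import Mathlib
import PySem

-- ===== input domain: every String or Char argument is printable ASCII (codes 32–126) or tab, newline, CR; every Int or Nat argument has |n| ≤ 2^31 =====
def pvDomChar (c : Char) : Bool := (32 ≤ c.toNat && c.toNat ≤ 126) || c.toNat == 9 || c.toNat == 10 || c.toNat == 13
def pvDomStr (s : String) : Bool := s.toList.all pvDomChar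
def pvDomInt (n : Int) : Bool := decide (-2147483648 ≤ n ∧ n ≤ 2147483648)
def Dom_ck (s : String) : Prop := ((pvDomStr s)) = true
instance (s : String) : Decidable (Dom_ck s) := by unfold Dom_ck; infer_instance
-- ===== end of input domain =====

-- B replaces A's hand-maintained cnt/flg state machine by a first-non-'?' scan plus
-- split-on-separator + map-length (idiomatic decomposition, same O(n) cost).

-- ===== PORT A =====
-- the for-loop over s with state (cnt, lst, ret, flg), transliterated as structural recursion
def ckLoop : List Char → Int → List Int → String → Bool → Int × List Int × String × Bool
  | [], cnt, lst, ret, flg => (cnt, lst, ret, flg)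
  | c :: rest, cnt, lst, ret, flg =>
    if c = '?' then
      ckLoop rest (cnt + 1) lst ret flg
    else if c = '(' then
      ckLoop rest 0 (lst ++ [cnt]) (if flg then String.mk [c] else ret) (if flg then false else flg)
    else
      ckLoop rest 0 (lst ++ [cnt]) (if flg then String.mk [c] else ret) (if flg then false else flg)

def ck (s : String) : String × List Int :=
  let r := ckLoop s.toList 0 [] "" true
  (r.2.2.1, r.2.1 ++ [r.1])

-- ===== PORT B =====
-- ''.join(c if c == '?' else ' ' for c in s).split(' ') ported as map + List.splitOn
def ck_alt (s : String) : String × List Int :=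
  let cs := s.toList
  let ret := match cs.find? (fun c => c ≠ '?') with
    | some c => String.mk [c]
    | none => ""
  let lst := ((cs.map (fun c => if c = '?' then c else ' ')).splitOn ' ').map
    (fun p => (p.length : Int))
  (ret, lst)

-- ===== PRECONDITION & SPEC =====
def Spec_ck (s : String) (out : String × List Int) : Prop := out = ck_alt s
instance (s : String) (out : String × List Int) : Decidable (Spec_ck s out) := by unfold Spec_ck; infer_instance

-- ===== CLAIM (what is proved, stated in full; the proofs are below) =====
def Claim_equal_ck : Prop := ∀ (s : String), Dom_ck s → Spec_ck s (ck s)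

-- ===== LEMMAS AND PROOFS =====

-- B's list side on raw char lists
def blB (l : List Char) : List Int :=
  ((l.map (fun c => if c = '?' then c else ' ')).splitOn ' ').map (fun p => (p.length : Int))

-- add n to the head element (no-op on [])
def addHead (n : Int) : List Int → List Int
  | [] => []
  | x :: r => (n + x) :: r

lemma blB_nil : blB [] = [0] := by decide

lemma blB_cons_q (t : List Char) : blB ('?' :: t) = addHead 1 (blB t) := by
  cases hsp : (t.map (fun c => if c = '?' then c else ' ')).splitOnP (· == ' ') with
  | nil =>
    simp [blB, List.splitOn, List.splitOnP_cons, hsp, List.modifyHead, addHead]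
  | cons p r =>
    simp [blB, List.splitOn, List.splitOnP_cons, hsp, List.modifyHead, addHead]
    omega

lemma blB_cons_ne (c : Char) (t : List Char) (hc : c ≠ '?') :
    blB (c :: t) = 0 :: blB t := by
  simp only [blB, List.map_cons, if_neg hc, List.splitOn, List.splitOnP_cons]
  simp

lemma addHead_addHead (m n : Int) (l : List Int) :
    addHead m (addHead n l) = addHead (m + n) l := by
  cases l <;> simp [addHead] <;> omega

lemma addHead_zero (l : List Int) : addHead 0 l = l := by
  cases l <;> simp [addHead]

-- main invariant of A's loop, against B's decomposition
lemma ckLoop_spec (l : List Char) : ∀ (cnt : Int) (lst : List Int) (ret : String) (flg : Bool),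
    (ckLoop l cnt lst ret flg).2.1 ++ [(ckLoop l cnt lst ret flg).1]
      = lst ++ addHead cnt (blB l)
    ∧ (ckLoop l cnt lst ret flg).2.2.1
      = (if flg then
           (match l.find? (fun c => c ≠ '?') with
            | some c => String.mk [c]
            | none => ret)
         else ret) := by
  induction l with
  | nil =>
    intro cnt lst ret flg
    constructor
    · simp [ckLoop, blB_nil, addHead]
    · cases flg <;> simp [ckLoop, List.find?]
  | cons c t ih =>
    intro cnt lst ret flg
    by_cases hc : c = '?'
    · subst hc
      have := ih (cnt + 1) lst ret flg
      constructor
      · rw [show ckLoop ('?' :: t) cnt lst ret flg = ckLoop t (cnt + 1) lst ret flg from by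
          simp [ckLoop]]
        rw [this.1, blB_cons_q, addHead_addHead]
      · rw [show ckLoop ('?' :: t) cnt lst ret flg = ckLoop t (cnt + 1) lst ret flg from by
          simp [ckLoop]]
        rw [this.2]
        cases flg <;> simp [List.find?]
    · have hstep : ckLoop (c :: t) cnt lst ret flg
          = ckLoop t 0 (lst ++ [cnt]) (if flg then String.mk [c] else ret)
              (if flg then false else flg) := by
        by_cases hp : c = '('
        · simp [ckLoop, hc, hp]
        · simp [ckLoop, hc, hp]
      have := ih 0 (lst ++ [cnt]) (if flg then String.mk [c] else ret)
        (if flg then false else flg)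
      constructor
      · rw [hstep, this.1, addHead_zero, blB_cons_ne c t hc]
        simp [addHead]
      · rw [hstep, this.2]
        cases flg
        · simp
        · simp [List.find?, hc]

-- ===== VERDICT (by name: the statement is the Claim_ definition above) =====
theorem ck_spec : Claim_equal_ck := by
  intro s _
  unfold Spec_ck ck ck_alt
  have h := ckLoop_spec s.toList 0 [] "" true
  simp only [if_pos] at h
  refine Prod.ext ?_ ?_
  · simpa using h.2
  · simpa [addHead_zero, blB] using h.1
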